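-- pv_equiv track=rewrite | github.com/wyl116/genworker | src/context/compaction/tool_trimmer.py | _identify_round_boundaries
-- ===== SOURCE A (Python) =====
-- from typing import Any
--
-- def _identify_round_boundaries(
--     messages: tuple[dict[str, Any], ...],
-- ) -> tuple[tuple[int, int], ...]:
--     """
--     Identify API round boundaries in messages.
--
--     A round = one assistant response + subsequent tool messages.
--     Returns (start_index, end_index) tuples where end_index is exclusive.
--     """
--     boundaries: list[tuple[int, int]] = []
--     i = 0
--     while i < len(messages):
--         if messages[i].get("role") == "assistant":
--             start = i
--             i += 1
--             while i < len(messages) and messages[i].get("role") == "tool":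
--                 i += 1
--             boundaries.append((start, i))
--         else:
--             i += 1
--     return tuple(boundaries)
-- ===== SOURCE B (Python) =====
-- from typing import Any
--
--
-- def _identify_round_boundaries(
--     messages: tuple[dict[str, Any], ...],
-- ) -> tuple[tuple[int, int], ...]:
--     """Flat single pass: open a round on 'assistant', extend it on 'tool'."""
--     boundaries: list[tuple[int, int]] = []
--     active = False
--     for i, msg in enumerate(messages):
--         role = msg.get("role")
--         if role == "assistant":
--             boundaries.append((i, i + 1))
--             active = True
--         elif role == "tool" and active:
--             boundaries[-1] = (boundaries[-1][0], i + 1)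
--         else:
--             active = False
--     return tuple(boundaries)
-- ===== Notes on version B (the rewrite author's own statement) =====
-- stated objective: simpler
-- what changed: Replaces A's nested while loops (outer index loop with an inner tool-skipping scan) by one flat pass over enumerate(messages) with an `active` flag that opens a boundary on 'assistant' and extends the last boundary in place on 'tool'.
import Mathlib
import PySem

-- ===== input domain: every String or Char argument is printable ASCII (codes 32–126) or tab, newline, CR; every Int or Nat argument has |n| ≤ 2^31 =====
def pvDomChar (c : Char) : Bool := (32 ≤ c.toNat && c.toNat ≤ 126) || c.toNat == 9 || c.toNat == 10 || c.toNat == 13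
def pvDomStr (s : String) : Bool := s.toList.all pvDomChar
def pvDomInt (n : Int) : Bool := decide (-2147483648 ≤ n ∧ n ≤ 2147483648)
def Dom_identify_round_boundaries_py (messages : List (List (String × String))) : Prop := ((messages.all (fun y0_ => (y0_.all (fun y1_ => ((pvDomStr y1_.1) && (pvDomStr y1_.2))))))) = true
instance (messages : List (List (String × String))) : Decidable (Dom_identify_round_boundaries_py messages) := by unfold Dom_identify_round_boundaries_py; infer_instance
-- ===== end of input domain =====

-- B replaces A's nested while loops by one flat pass with an `active` flag that extends the
-- last boundary in place (objective: simpler).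

-- ===== PORT A =====
-- inner `while i < len(messages) and messages[i].get("role") == "tool": i += 1`
-- (the while over index i is rendered as structural recursion on the remaining suffix,
--  carrying i; returns the new i and the remaining suffix)
def pvSkipTools : List (List (String × String)) → Nat → Nat × List (List (String × String))
  | [], i => (i, [])
  | m :: rest, i =>
    if ((PySem.Dict.mk m).get? "role") == some "tool" then pvSkipTools rest (i + 1)
    else (i, m :: rest)

-- needed by pvALoop's termination proof
theorem pvSkipTools_len_le : ∀ (ms : List (List (String × String))) (i : Nat),
    (pvSkipTools ms i).2.length ≤ ms.length := by
  intro ms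
  induction ms with
  | nil => intro i; simp [pvSkipTools]
  | cons m rest ih =>
    intro i
    simp only [pvSkipTools]
    split
    · exact Nat.le_trans (ih (i + 1)) (Nat.le_succ _)
    · simp

-- outer while loop of A
def pvALoop : List (List (String × String)) → Nat → List (Int × Int) → List (Int × Int)
  | [], _, bs => bs
  | m :: rest, i, bs =>
    if ((PySem.Dict.mk m).get? "role") == some "assistant" then
      let p := pvSkipTools rest (i + 1)
      pvALoop p.2 p.1 (bs ++ [((i : Int), (p.1 : Int))])
    else pvALoop rest (i + 1) bs
termination_by ms => ms.length
decreasing_by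
  · exact Nat.lt_succ_of_le (pvSkipTools_len_le rest (i + 1))
  · simp

def identify_round_boundaries_py (messages : List (List (String × String))) : List (Int × Int) :=
  pvALoop messages 0 []

-- ===== PORT B =====
-- one step of B's flat for-loop; the Python appends and updates boundaries[-1], rendered
-- functionally as a reversed accumulator (prepend / update head) reversed at the end
def pvBStep (st : List (Int × Int) × Bool) (p : Int × List (String × String)) :
    List (Int × Int) × Bool :=
  let role := (PySem.Dict.mk p.2).get? "role"
  if role == some "assistant" then ((p.1, p.1 + 1) :: st.1, true)
  else if role == some "tool" && st.2 then
    (match st.1 with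
     | (s, _) :: t => (s, p.1 + 1) :: t
     | [] => st.1, st.2)
  else (st.1, false)

def identify_round_boundaries_py_alt (messages : List (List (String × String))) : List (Int × Int) :=
  ((PySem.List.enumerate messages 0).foldl pvBStep ([], false)).1.reverse

-- ===== PRECONDITION & SPEC =====
def Spec_identify_round_boundaries_py (messages : List (List (String × String))) (out : List (Int × Int)) : Prop := out = identify_round_boundaries_py_alt messages
instance (messages : List (List (String × String))) (out : List (Int × Int)) : Decidable (Spec_identify_round_boundaries_py messages out) := by unfold Spec_identify_round_boundaries_py; infer_instance

-- ===== CLAIM (what is proved, stated in full; the proofs are below) =====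
def Claim_equal_identify_round_boundaries_py : Prop := ∀ (messages : List (List (String × String))), Dom_identify_round_boundaries_py messages → Spec_identify_round_boundaries_py messages (identify_round_boundaries_py messages)

-- ===== LEMMAS AND PROOFS =====

-- B's fold over the tool prefix does exactly what A's inner while does: it moves the end of
-- the open boundary to the index pvSkipTools returns
theorem pvFoldTools : ∀ (ms : List (List (String × String))) (i : Nat) (s : Int) (t : List (Int × Int)),
    (PySem.List.enumerate ms (i : Int)).foldl pvBStep ((s, (i : Int)) :: t, true)
      = (PySem.List.enumerate (pvSkipTools ms i).2 ((pvSkipTools ms i).1 : Int)).foldl pvBStep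
          ((s, ((pvSkipTools ms i).1 : Int)) :: t, true) := by
  intro ms
  induction ms with
  | nil => intro i s t; simp [pvSkipTools]
  | cons m rest ih =>
    intro i s t
    by_cases h : (((PySem.Dict.mk m).get? "role") == some "tool") = true
    · have hna : (((PySem.Dict.mk m).get? "role") == some "assistant") = false := by
        rcases hr : (PySem.Dict.mk m).get? "role" with _ | r
        · simp [hr] at h
        · simp [hr] at h ⊢; simp [h]
      rw [PySem.List.enumerate_cons]
      simp only [List.foldl_cons]
      have hstep : pvBStep ((s, (i : Int)) :: t, true) ((i : Int), m)
          = ((s, (i : Int) + 1) :: t, true) := by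
        simp [pvBStep, hna, h]
      rw [hstep]
      have hskip : pvSkipTools (m :: rest) i = pvSkipTools rest (i + 1) := by
        simp [pvSkipTools, h]
      rw [hskip]
      have hc : (i : Int) + 1 = ((i + 1 : Nat) : Int) := by push_cast; ring
      rw [hc]
      exact ih (i + 1) s t
    · have hskip : pvSkipTools (m :: rest) i = (i, m :: rest) := by
        simp [pvSkipTools, h]
      rw [hskip]

-- once the head of the remaining list is not a "tool" message (or the list is empty),
-- the value of the active flag is irrelevant
theorem pvActiveIrrel (ms : List (List (String × String))) (s : Int) (acc : List (Int × Int))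
    (h : ms = [] ∨ ∃ m rest, ms = m :: rest ∧ (((PySem.Dict.mk m).get? "role") == some "tool") = false) :
    ((PySem.List.enumerate ms s).foldl pvBStep (acc, true)).1
      = ((PySem.List.enumerate ms s).foldl pvBStep (acc, false)).1 := by
  rcases h with h | ⟨m, rest, hm, hr⟩
  · simp [h]
  · subst hm
    rw [PySem.List.enumerate_cons]
    simp only [List.foldl_cons]
    by_cases ha : (((PySem.Dict.mk m).get? "role") == some "assistant") = true
    · simp [pvBStep, ha]
    · simp [pvBStep, ha, hr]

-- pvSkipTools stops at the end of the list or at a non-"tool" message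
theorem pvSkipTools_stop : ∀ (ms : List (List (String × String))) (i : Nat),
    (pvSkipTools ms i).2 = [] ∨ ∃ m rest, (pvSkipTools ms i).2 = m :: rest ∧
      (((PySem.Dict.mk m).get? "role") == some "tool") = false := by
  intro ms
  induction ms with
  | nil => intro i; left; simp [pvSkipTools]
  | cons m rest ih =>
    intro i
    by_cases h : (((PySem.Dict.mk m).get? "role") == some "tool") = true
    · simpa [pvSkipTools, h] using ih (i + 1)
    · right
      refine ⟨m, rest, ?_, by simpa using h⟩
      simp [pvSkipTools, h]

-- the main invariant: A's outer loop with accumulated boundaries acc.reverse computes the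
-- reverse of B's fold started from (acc, false)
theorem pvMain : ∀ (n : Nat) (ms : List (List (String × String))), ms.length ≤ n →
    ∀ (i : Nat) (acc : List (Int × Int)),
    pvALoop ms i acc.reverse = ((PySem.List.enumerate ms (i : Int)).foldl pvBStep (acc, false)).1.reverse := by
  intro n
  induction n with
  | zero =>
    intro ms hlen i acc
    have : ms = [] := List.length_eq_zero_iff.mp (Nat.le_zero.mp hlen)
    subst this; simp [pvALoop]
  | succ n ih =>
    intro ms hlen i acc
    match ms with
    | [] => simp [pvALoop]
    | m :: rest =>
      have hrest : rest.length ≤ n := by simpa using Nat.lt_succ_iff.mp (Nat.lt_of_lt_of_le (by simp) hlen)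
      rw [PySem.List.enumerate_cons]
      by_cases ha : (((PySem.Dict.mk m).get? "role") == some "assistant") = true
      · -- assistant: A opens a round and skips tools; B pushes (i, i+1) and extends it
        simp only [pvALoop, ha, if_pos]
        simp only [List.foldl_cons, pvBStep, ha, if_pos]
        have hcast : (i : Int) + 1 = ((i + 1 : Nat) : Int) := by push_cast; ring
        rw [hcast, pvFoldTools rest (i + 1) (i : Int) acc]
        rw [pvActiveIrrel _ _ _ (pvSkipTools_stop rest (i + 1))]
        have h2 : (pvSkipTools rest (i + 1)).2.length ≤ n :=
          Nat.le_trans (pvSkipTools_len_le rest (i + 1)) hrest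
        have := ih (pvSkipTools rest (i + 1)).2 h2 (pvSkipTools rest (i + 1)).1
          (((i : Int), ((pvSkipTools rest (i + 1)).1 : Int)) :: acc)
        simpa using this
      · -- not assistant: with active = false B just resets the flag; A advances
        have hstep : pvBStep (acc, false) ((i : Int), m) = (acc, false) := by
          by_cases ht : (((PySem.Dict.mk m).get? "role") == some "tool") = true <;>
            simp [pvBStep, ha, ht]
        simp only [pvALoop, ha, List.foldl_cons, hstep, Bool.false_eq_true, if_false]
        have hcast : (i : Int) + 1 = ((i + 1 : Nat) : Int) := by push_cast; ring
        rw [hcast]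
        exact ih rest hrest (i + 1) acc

-- ===== VERDICT (by name: the statement is the Claim_ definition above) =====
theorem identify_round_boundaries_py_spec : Claim_equal_identify_round_boundaries_py := by
  intro messages _
  unfold Spec_identify_round_boundaries_py identify_round_boundaries_py identify_round_boundaries_py_alt
  have := pvMain messages.length messages (Nat.le_refl _) 0 []
  simpa using this
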